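-- pv_equiv track=rewrite | github.com/Martin-Seysen/mmgroup | src/mmgroup/dev/mat24/make_addition_table.py | reassign_registers
-- ===== SOURCE A (Python) =====
-- class register_set(object):
--     def __init__(self):
--         self.free = []
--         self.n = 0
--     def alloc(self):
--         if not len(self.free):
--             self.free.append(self.n)
--             self.n += 1
--         return self.free.pop()
--     def dealloc(self, n):
--         assert 0 <= n < self.n
--         self.free.append(n)
--     def alloc_index(self,n):
--         while self.n <= n:
--            self.free.append(self.n)
--            self.n += 1
--         i = self.free.index(n)
--         del self.free[i]
--         return n
--
-- def reassign_registers(data, registers):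
--     mapping = {}
--     free_registers =  register_set()
--     for i,x in enumerate(data):
--         if x in registers.keys() and not registers[x] in mapping.keys():
--              mapping[registers[x]] = free_registers.alloc_index(i)
--     for r in registers.values():
--         if not r in mapping.keys():
--              mapping[r] = free_registers.alloc()
--     new_registers = {}
--     for x in registers.keys():
--         new_registers[x] = mapping[registers[x]]
--     return new_registers
-- ===== SOURCE B (Python) =====
-- def reassign_registers(data, registers):
--     # Mapping built wholly from precomputed lists zipped together: one scan for
--     # first-occurrence indices, then leftover register ids paired with descending
--     # free slots and fresh ids -- no mutable free-list / allocator object at all.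
--     first = {}
--     n = 0
--     for i, x in enumerate(data):
--         r = registers.get(x)
--         if r is not None and r not in first:
--             first[r] = i
--             n = i + 1
--     reserved = set(first.values())
--     slots = [j for j in reversed(range(n)) if j not in reserved]
--     leftovers = [r for r in dict.fromkeys(registers.values()) if r not in first]
--     extra = range(n, n + max(0, len(leftovers) - len(slots)))
--     mapping = {**first, **dict(zip(leftovers, slots + list(extra)))}
--     return {x: mapping[registers[x]] for x in registers}
-- ===== Notes on version B (the rewrite author's own statement) =====
-- stated objective: alternative
-- what changed: A simulates a mutable register_set allocator (alloc_index extends and rescans a free list per allocation, a second loop pops from it); B builds the mapping from pure precomputed lists: one scan for first-occurrence indices, then the leftover register ids are zipped in one shot with descending free slots plus fresh ids - no allocator object or mutable free list.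
import Mathlib
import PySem

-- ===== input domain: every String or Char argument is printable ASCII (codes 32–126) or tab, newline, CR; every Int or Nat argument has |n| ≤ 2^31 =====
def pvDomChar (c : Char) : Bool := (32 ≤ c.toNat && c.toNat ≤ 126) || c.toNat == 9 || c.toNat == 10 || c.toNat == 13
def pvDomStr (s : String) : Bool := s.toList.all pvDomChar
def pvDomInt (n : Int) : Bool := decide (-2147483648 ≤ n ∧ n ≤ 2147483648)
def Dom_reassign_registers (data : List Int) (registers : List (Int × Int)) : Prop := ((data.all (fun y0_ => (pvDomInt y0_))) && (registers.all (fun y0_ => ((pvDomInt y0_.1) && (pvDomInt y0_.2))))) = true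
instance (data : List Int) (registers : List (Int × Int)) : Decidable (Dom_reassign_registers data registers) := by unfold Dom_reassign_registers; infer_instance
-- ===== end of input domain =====

-- B replaces A's stateful register_set allocator (two allocation loops mutating a free
-- list) by pure precomputed lists zipped together: first-occurrence dict, descending
-- free slots, fresh ids; the mapping dict is built by one zip, not by an allocator.

-- ===== PORT A =====
-- register_set state is the pair (free, n).  alloc_index's 'while self.n <= n' loop:
def pvAllocIndexLoop (free : List Int) (nn : Int) (n : Int) : List Int × Int :=
  if nn ≤ n then pvAllocIndexLoop (free ++ [nn]) (nn + 1) n else (free, nn)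
termination_by (n + 1 - nn).toNat
decreasing_by omega

-- alloc_index: extend, then 'i = self.free.index(n); del self.free[i]' = remove first occurrence.
-- Python raises ValueError when n is absent; that never happens from reassign_registers
-- (indices are strictly increasing), so the none branch below is unreachable there.
def pvAllocIndex (rs : List Int × Int) (n : Int) : (List Int × Int) × Int :=
  ((match PySem.List.remove? (pvAllocIndexLoop rs.1 rs.2 n).1 n with
    | some free' => free'
    | none => (pvAllocIndexLoop rs.1 rs.2 n).1,
   (pvAllocIndexLoop rs.1 rs.2 n).2), n)

-- alloc: refill when empty, then free.pop() (last element; list nonempty, none unreachable)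
def pvAllocPop (fr : List Int × Int) : (List Int × Int) × Int :=
  match PySem.List.pop? fr.1 (-1) with
  | some pr => ((pr.2, fr.2), pr.1)
  | none => ((fr.1, fr.2), 0)

def pvAlloc (rs : List Int × Int) : (List Int × Int) × Int :=
  pvAllocPop (if rs.1.length = 0 then (rs.1 ++ [rs.2], rs.2 + 1) else rs)

-- body of A's first loop: 'if x in registers.keys() and not registers[x] in mapping.keys()'
def pvStepA1 (regs : PySem.Dict Int Int) (st : PySem.Dict Int Int × (List Int × Int)) (p : Int × Int) :
    PySem.Dict Int Int × (List Int × Int) :=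
  if regs.contains p.2 && !(st.1.contains (regs.getD p.2 0)) then
    let res := pvAllocIndex st.2 p.1
    (st.1.insert (regs.getD p.2 0) res.2, res.1)
  else st

-- body of A's second loop: 'if not r in mapping.keys(): mapping[r] = free_registers.alloc()'
def pvStepA2 (st : PySem.Dict Int Int × (List Int × Int)) (r : Int) :
    PySem.Dict Int Int × (List Int × Int) :=
  if st.1.contains r then st
  else
    let res := pvAlloc st.2
    (st.1.insert r res.2, res.1)

def reassign_registers (data : List Int) (registers : List (Int × Int)) : List (Int × Int) :=
  let regs : PySem.Dict Int Int := PySem.Dict.mk registers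
  let st1 := (PySem.List.enumerate data).foldl (pvStepA1 regs) (PySem.Dict.empty, ([], 0))
  let st2 := regs.values.foldl pvStepA2 st1
  let newRegs := regs.keys.foldl
    (fun (d : PySem.Dict Int Int) x => d.insert x (st2.1.getD (regs.getD x 0) 0))
    PySem.Dict.empty
  newRegs.items

-- ===== PORT B =====
-- body of B's only loop: record first-occurrence index and n = i + 1
def pvStepB1 (regs : PySem.Dict Int Int) (st : PySem.Dict Int Int × Int) (p : Int × Int) :
    PySem.Dict Int Int × Int :=
  match regs.get? p.2 with
  | some r => if st.1.contains r then st else (st.1.insert r p.1, p.1 + 1)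
  | none => st

def reassign_registers_alt (data : List Int) (registers : List (Int × Int)) : List (Int × Int) :=
  let regs : PySem.Dict Int Int := PySem.Dict.mk registers
  let s1 := (PySem.List.enumerate data).foldl (pvStepB1 regs) (PySem.Dict.empty, 0)
  let reserved : PySem.Set Int := PySem.Set.ofList s1.1.values
  let slots := ((PySem.List.pyRange 0 s1.2 1).reverse).filter (fun j => !(PySem.Set.contains reserved j))
  let leftovers := (PySem.List.dedup regs.values).filter (fun r => !(s1.1.contains r))
  let extra := PySem.List.pyRange s1.2 (s1.2 + max 0 ((leftovers.length : Int) - (slots.length : Int))) 1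
  let mapping := (leftovers.zip (slots ++ extra)).foldl
    (fun (d : PySem.Dict Int Int) p => d.insert p.1 p.2) s1.1
  (regs.keys.foldl
    (fun (d : PySem.Dict Int Int) x => d.insert x (mapping.getD (regs.getD x 0) 0))
    PySem.Dict.empty).items

-- ===== PRECONDITION & SPEC =====
def Spec_reassign_registers (data : List Int) (registers : List (Int × Int)) (out : List (Int × Int)) : Prop := out = reassign_registers_alt data registers
instance (data : List Int) (registers : List (Int × Int)) (out : List (Int × Int)) : Decidable (Spec_reassign_registers data registers out) := by unfold Spec_reassign_registers; infer_instance

-- ===== CLAIM (what is proved, stated in full; the proofs are below) =====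
def Claim_equal_reassign_registers : Prop := ∀ (data : List Int) (registers : List (Int × Int)), Dom_reassign_registers data registers → Spec_reassign_registers data registers (reassign_registers data registers)

-- ===== LEMMAS AND PROOFS =====

-- A's free list, expressed from the loop-1 result: unreserved slots below n, ascending
def pvFreeOf (used : List Int) (n : Int) : List Int :=
  (PySem.List.pyRange 0 n 1).filter (fun j => !(used.contains j))

lemma pvValues_insert (d : PySem.Dict Int Int) (k v : Int) (h : d.contains k = false) :
    (d.insert k v).values = d.values ++ [v] := by
  simp [PySem.Dict.values, PySem.Dict.items_insert_of_not_contains, h]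

lemma pvAllocIndexLoop_eq (i : Int) : ∀ (k : Nat) (nn : Int) (free : List Int), i - nn = k → nn ≤ i →
    pvAllocIndexLoop free nn i = (free ++ PySem.List.pyRange nn (i + 1) 1, i + 1) := by
  intro k
  induction k with
  | zero =>
    intro nn free hk h
    have hni : nn = i := by omega
    subst hni
    rw [pvAllocIndexLoop, if_pos le_rfl, pvAllocIndexLoop, if_neg (by omega),
      PySem.List.pyRange_one_singleton]
  | succ k ih =>
    intro nn free hk h
    rw [pvAllocIndexLoop, if_pos h, ih (nn + 1) (free ++ [nn]) (by omega) (by omega),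
      List.append_assoc]
    congr 2
    exact (PySem.List.pyRange_one_cons (by omega)).symm

lemma pvRemove?_append_of_not_mem (l1 l2 : List Int) (v : Int) (h : v ∉ l1) :
    PySem.List.remove? (l1 ++ l2) v = (PySem.List.remove? l2 v).map (l1 ++ ·) := by
  induction l1 with
  | nil => simp
  | cons a l ih =>
    have ha : a ≠ v := by simp at h; tauto
    rw [List.cons_append, PySem.List.remove?_cons_of_ne (l ++ l2) ha, ih (by simp at h; tauto)]
    cases PySem.List.remove? l2 v <;> simp

lemma pvAllocIndex_eq (free : List Int) (nn i : Int) (h : nn ≤ i) (hf : ∀ j ∈ free, j < nn) :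
    pvAllocIndex (free, nn) i = ((free ++ PySem.List.pyRange nn i 1, i + 1), i) := by
  unfold pvAllocIndex
  rw [pvAllocIndexLoop_eq i (i - nn).toNat nn free (by omega) h]
  have hnm : i ∉ free ++ PySem.List.pyRange nn i 1 := by
    intro hmem
    rcases List.mem_append.1 hmem with h1 | h2
    · exact absurd (hf _ h1) (by omega)
    · have := PySem.List.mem_pyRange_one.1 h2; omega
  rw [PySem.List.pyRange_one_succ_right h, ← List.append_assoc,
    pvRemove?_append_of_not_mem _ _ _ hnm, PySem.List.remove?_cons_self]
  simp

lemma pvFreeOf_step (used : List Int) (n i : Int) (h0 : 0 ≤ n) (hn : n ≤ i)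
    (hu : ∀ j ∈ used, j < n) :
    pvFreeOf used n ++ PySem.List.pyRange n i 1 = pvFreeOf (used ++ [i]) (i + 1) := by
  unfold pvFreeOf
  rw [PySem.List.pyRange_one_append 0 n (i + 1) h0 (by omega), List.filter_append]
  congr 1
  · apply List.filter_congr
    intro j hj
    have hj' := PySem.List.mem_pyRange_one.1 hj
    have hne : j ≠ i := by omega
    simp [hne]
  · rw [PySem.List.pyRange_one_succ_right hn, List.filter_append]
    have h1 : (PySem.List.pyRange n i 1).filter (fun j => !((used ++ [i]).contains j)) = PySem.List.pyRange n i 1 := by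
      apply List.filter_eq_self.mpr
      intro j hj
      have hj' := PySem.List.mem_pyRange_one.1 hj
      have hnm : j ∉ used := fun hm => absurd (hu j hm) (by omega)
      have hne : j ≠ i := by omega
      simp [hnm, hne]
    have h2 : ([i] : List Int).filter (fun j => !((used ++ [i]).contains j)) = [] := by simp
    rw [h1, h2, List.append_nil]

lemma pvLoop1 (regs : PySem.Dict Int Int) (rest : List Int) :
    ∀ (s n : Int) (m : PySem.Dict Int Int),
    0 ≤ n → n ≤ s → (∀ j ∈ m.values, 0 ≤ j ∧ j < n) →
    (PySem.List.enumerate rest s).foldl (pvStepA1 regs) (m, (pvFreeOf m.values n, n)) =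
      (((PySem.List.enumerate rest s).foldl (pvStepB1 regs) (m, n)).1,
       pvFreeOf (((PySem.List.enumerate rest s).foldl (pvStepB1 regs) (m, n)).1.values)
         (((PySem.List.enumerate rest s).foldl (pvStepB1 regs) (m, n)).2),
       ((PySem.List.enumerate rest s).foldl (pvStepB1 regs) (m, n)).2) := by
  induction rest with
  | nil => intro s n m _ _ _; simp [PySem.List.enumerate_nil]
  | cons x rest ih =>
    intro s n m h0 hns hu
    rw [PySem.List.enumerate_cons]
    simp only [List.foldl_cons]
    cases hg : regs.get? x with
    | none =>
      have hc : regs.contains x = false := by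
        rw [PySem.Dict.contains_eq_isSome_get?, hg]; rfl
      have hA : pvStepA1 regs (m, (pvFreeOf m.values n, n)) (s, x) = (m, (pvFreeOf m.values n, n)) := by
        unfold pvStepA1; simp [hc]
      have hB : pvStepB1 regs (m, n) (s, x) = (m, n) := by
        unfold pvStepB1; simp [hg]
      rw [hA, hB]
      exact ih (s + 1) n m h0 (by omega) hu
    | some r =>
      have hc : regs.contains x = true := by
        rw [PySem.Dict.contains_eq_isSome_get?, hg]; rfl
      have hgd : regs.getD x 0 = r := by
        rw [PySem.Dict.getD_eq_get?_getD, hg]; rfl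
      by_cases hm : m.contains r = true
      · have hA : pvStepA1 regs (m, (pvFreeOf m.values n, n)) (s, x) = (m, (pvFreeOf m.values n, n)) := by
          unfold pvStepA1; simp [hc, hgd, hm]
        have hB : pvStepB1 regs (m, n) (s, x) = (m, n) := by
          unfold pvStepB1; simp [hg, hm]
        rw [hA, hB]
        exact ih (s + 1) n m h0 (by omega) hu
      · have hm' : m.contains r = false := by simpa using hm
        have hres := pvAllocIndex_eq (pvFreeOf m.values n) n s hns
          (fun j hj => by
            have := PySem.List.mem_pyRange_one.1 (List.mem_of_mem_filter (by exact hj : j ∈ (PySem.List.pyRange 0 n 1).filter _))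
            omega)
        have hA : pvStepA1 regs (m, (pvFreeOf m.values n, n)) (s, x)
            = (m.insert r s, (pvFreeOf (m.insert r s).values (s + 1), s + 1)) := by
          unfold pvStepA1
          simp only [hc, hgd, hm, Bool.not_false, Bool.and_true, if_true, hres]
          rw [pvValues_insert m r s hm',
            pvFreeOf_step m.values n s h0 hns (fun j hj => (hu j hj).2)]
        have hB : pvStepB1 regs (m, n) (s, x) = (m.insert r s, s + 1) := by
          unfold pvStepB1; simp [hg, hm]
        rw [hA, hB]
        refine ih (s + 1) (s + 1) (m.insert r s) (by omega) le_rfl ?_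
        intro j hj
        rw [pvValues_insert m r s hm'] at hj
        rcases List.mem_append.1 hj with h | h
        · have := hu j h; omega
        · simp at h; omega

-- the leftover register ids, by their first occurrence, skipping ids p already marks
def pvLL (p : Int → Bool) : List Int → List Int
  | [] => []
  | r :: rs => if p r then pvLL p rs else r :: pvLL (fun y => p y || y == r) rs

lemma pvLL_congr (p q : Int → Bool) (h : ∀ y, p y = q y) : ∀ rs, pvLL p rs = pvLL q rs := by
  intro rs
  induction rs generalizing p q with
  | nil => rfl
  | cons r rs ih =>
    simp only [pvLL, h r]
    by_cases hq : q r = true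
    · simp [hq, ih _ _ h]
    · simp only [Bool.not_eq_true] at hq
      simp [hq, ih (fun y => p y || y == r) (fun y => q y || y == r)
        (fun y => by simp only [h y])]

-- A's second loop IS: zip the leftovers with reversed free slots then fresh ids
lemma pvZ (rs : List Int) : ∀ (m : PySem.Dict Int Int) (free : List Int) (n e : Int),
    n ≤ e → (pvLL m.contains rs).length ≤ free.length + (e - n).toNat →
    (rs.foldl pvStepA2 (m, free, n)).1 =
      ((pvLL m.contains rs).zip (free.reverse ++ PySem.List.pyRange n e 1)).foldl
        (fun (d : PySem.Dict Int Int) p => d.insert p.1 p.2) m := by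
  induction rs with
  | nil => intro m free n e _ _; simp [pvLL]
  | cons r rs ih =>
    intro m free n e hne hsup
    by_cases hm : m.contains r = true
    · have hA : pvStepA2 (m, free, n) r = (m, free, n) := by unfold pvStepA2; simp [hm]
      simp only [List.foldl_cons, hA, pvLL, hm, if_true] at *
      exact ih m free n e hne hsup
    · have hm' : m.contains r = false := by simpa using hm
      have hLL : ∀ (a : Int), pvLL (fun y => m.contains y || y == r) rs
          = pvLL (m.insert r a).contains rs := by
        intro a
        refine pvLL_congr _ _ (fun y => ?_) rs
        rw [PySem.Dict.contains_insert]
        cases h1 : m.contains y <;> cases h2 : (y == r) <;> simp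
      simp only [pvLL, hm', Bool.false_eq_true, if_false] at hsup ⊢
      rcases List.eq_nil_or_concat free with hfree | ⟨ys, y, hfree⟩
      · subst hfree
        have hlt : n < e := by simp at hsup; omega
        have hpop : PySem.List.pop? [n] = some (n, []) := by
          simpa using PySem.List.pop?_last ([] : List Int) n
        have hA : pvStepA2 (m, [], n) r = (m.insert r n, [], n + 1) := by
          unfold pvStepA2 pvAlloc pvAllocPop
          simp [hm', hpop]
        rw [List.foldl_cons, hA, List.reverse_nil, List.nil_append,
          PySem.List.pyRange_one_cons hlt, List.zip_cons_cons, List.foldl_cons]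
        rw [ih (m.insert r n) [] (n + 1) e (by omega)
          (by rw [← hLL n]; simp at hsup ⊢; omega), hLL n]
        simp
      · rw [List.concat_eq_append] at hfree
        subst hfree
        have hA : pvStepA2 (m, ys ++ [y], n) r = (m.insert r y, ys, n) := by
          unfold pvStepA2 pvAlloc pvAllocPop
          simp [hm', PySem.List.pop?_last ys y]
        rw [List.foldl_cons, hA, List.reverse_append, List.reverse_singleton,
          List.singleton_append, List.cons_append, List.zip_cons_cons, List.foldl_cons]
        rw [ih (m.insert r y) ys n e hne
          (by rw [← hLL y]; simp at hsup ⊢; omega), hLL y]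

-- dedup-then-filter computes the same leftover list
lemma pvDedupFilter (q : Int → Bool) (rs : List Int) : ∀ (s : List Int),
    (rs.foldl PySem.Set.add s).filter q
      = s.filter q ++ pvLL (fun r => !(q r) || PySem.Set.contains s r) rs := by
  induction rs with
  | nil => intro s; simp [pvLL]
  | cons r rs ih =>
    intro s
    rw [List.foldl_cons]
    by_cases hs : PySem.Set.contains s r = true
    · have hadd : PySem.Set.add s r = s := by
        unfold PySem.Set.add; simp [(PySem.Set.contains_iff s r).1 hs]
      rw [hadd, ih s]
      simp [pvLL]
      intro _ hr
      exact absurd ((PySem.Set.contains_iff s r).1 hs) hr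
    · have hs' : PySem.Set.contains s r = false := by simpa using hs
      have hnm : r ∉ s := fun hm => by
        rw [(PySem.Set.contains_iff s r).2 hm] at hs'; cases hs'
      have hadd : PySem.Set.add s r = s ++ [r] := by
        unfold PySem.Set.add; simp [hnm]
      have hcon : ∀ y, PySem.Set.contains (s ++ [r]) y = (PySem.Set.contains s y || y == r) := by
        intro y; cases hyr : (y == r) <;>
          simp_all [PySem.Set.contains_eq_listContains, beq_iff_eq]
      rw [hadd, ih (s ++ [r]), List.filter_append]
      by_cases hq : q r = true
      · have hLL := pvLL_congr (fun y => !(q y) || PySem.Set.contains (s ++ [r]) y)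
          (fun y => (!(q y) || PySem.Set.contains s y) || y == r)
          (fun y => by simp only [hcon y, Bool.or_assoc]) rs
        rw [hLL]
        simp [pvLL, hq]
        intro hr
        exact absurd hr hnm
      · have hq' : q r = false := by simpa using hq
        have hLL := pvLL_congr (fun y => !(q y) || PySem.Set.contains (s ++ [r]) y)
          (fun y => !(q y) || PySem.Set.contains s y)
          (fun y => by
            simp only [hcon y, ← Bool.or_assoc]
            cases hyr : (y == r)
            · simp
            · have hyr' : y = r := by simpa [beq_iff_eq] using hyr
              subst hyr'
              simp [hq']) rs
        rw [hLL]
        simp [pvLL, hq']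

-- ===== VERDICT (by name: the statement is the Claim_ definition above) =====
theorem reassign_registers_spec : Claim_equal_reassign_registers := by
  unfold Claim_equal_reassign_registers
  intro data registers _
  unfold Spec_reassign_registers reassign_registers reassign_registers_alt
  simp only []
  have h0 : pvFreeOf (PySem.Dict.empty : PySem.Dict Int Int).values 0 = ([] : List Int) := by
    simp [pvFreeOf, PySem.List.pyRange_one_eq_nil]
  rw [← h0,
    pvLoop1 (PySem.Dict.mk registers) data 0 0 PySem.Dict.empty le_rfl le_rfl
      (by intro j hj
          simp [PySem.Dict.values, PySem.Dict.empty] at hj)]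
  set regs := PySem.Dict.mk registers with hregs
  set F := (PySem.List.enumerate data).foldl (pvStepB1 regs) (PySem.Dict.empty, 0) with hF
  set L := pvLL F.1.contains regs.values with hLdef
  set S := pvFreeOf F.1.values F.2 with hSdef
  -- B's slots are the reverse of A's free list, B's leftovers are pvLL
  have hpred : ∀ j : Int, PySem.Set.contains (PySem.Set.ofList F.1.values) j
      = F.1.values.contains j := by
    intro j
    simp [PySem.Set.contains_eq_listContains, PySem.Set.mem_ofList]
  have hslots : ((PySem.List.pyRange 0 F.2 1).reverse).filter
      (fun j => !(PySem.Set.contains (PySem.Set.ofList F.1.values) j)) = S.reverse := by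
    rw [hSdef]
    unfold pvFreeOf
    rw [← List.filter_reverse]
    apply List.filter_congr
    intro j _
    rw [hpred j]
  have hleft : (PySem.List.dedup regs.values).filter (fun r => !(F.1.contains r)) = L := by
    rw [PySem.List.dedup_eq_ofList, PySem.Set.ofList_eq_foldl,
      pvDedupFilter (fun r => !(F.1.contains r)) regs.values []]
    simp only [List.filter_nil, List.nil_append, hLdef]
    refine pvLL_congr _ _ (fun y => ?_) regs.values
    simp
  rw [hslots, hleft]
  have hne : F.2 ≤ F.2 + max 0 ((L.length : Int) - (S.reverse.length : Int)) := by
    have := le_max_left (0 : Int) ((L.length : Int) - (S.reverse.length : Int))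
    omega
  have hsup : (pvLL F.1.contains regs.values).length
      ≤ S.length + (F.2 + max 0 ((L.length : Int) - (S.reverse.length : Int)) - F.2).toNat := by
    rw [← hLdef]
    simp only [List.length_reverse]
    rcases max_cases (0 : Int) ((L.length : Int) - (S.length : Int)) with ⟨h1, h2⟩ | ⟨h1, h2⟩ <;>
      omega
  rw [pvZ regs.values F.1 S F.2
    (F.2 + max 0 ((L.length : Int) - (S.reverse.length : Int))) hne hsup, ← hLdef]
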